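-- pv_equiv track=rewrite | github.com/PeterGemmell/Yahoo_Finance_Stock_Screener | emailStocks.py | sort_tom
-- ===== SOURCE A (Python) =====
-- def sort_tom(stocks):
--     print ('Sorting next business days stocks...')
--     sorted = []
--     for stock in stocks:
--         if stock[4] == 'Before Market Open':
--             sorted.append(stock)
--     for stock in stocks:
--         if stock[4] == 'Time Not Supplied':
--             sorted.append(stock)
--     return sorted
-- ===== SOURCE B (Python) =====
-- def sort_tom(stocks):
--     print ('Sorting next business days stocks...')
--     keep = [s for s in stocks if s[4] in ('Before Market Open', 'Time Not Supplied')]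
--     return sorted(keep, key=lambda s: 0 if s[4] == 'Before Market Open' else 1)
-- ===== Notes on version B (the rewrite author's own statement) =====
-- stated objective: alternative
-- what changed: Replaces A's two full scans (one per label) with a single filter keeping the two wanted labels followed by one stable sort on a 0/1 key, so the list is traversed once and the group order comes from the sort instead of from scan repetition.
import Mathlib
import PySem

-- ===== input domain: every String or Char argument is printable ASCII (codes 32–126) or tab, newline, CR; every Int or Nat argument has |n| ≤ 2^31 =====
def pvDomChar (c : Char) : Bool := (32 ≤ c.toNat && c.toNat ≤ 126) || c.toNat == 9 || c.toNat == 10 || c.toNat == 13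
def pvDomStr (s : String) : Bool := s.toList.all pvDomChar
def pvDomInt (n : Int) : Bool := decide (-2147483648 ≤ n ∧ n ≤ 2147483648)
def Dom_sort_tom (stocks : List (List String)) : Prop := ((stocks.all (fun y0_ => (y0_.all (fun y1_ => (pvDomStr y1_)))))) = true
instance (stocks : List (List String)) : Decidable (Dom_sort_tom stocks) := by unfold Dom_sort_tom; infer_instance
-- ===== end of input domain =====

-- B replaces A's two full scans with one filter for the two wanted labels plus a stable
-- 0/1-keyed sort (an alternative decomposition; equivalence of RETURN values — the print
-- side effect is kept identical in Source B and not modelled here).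

-- ===== PORT A =====
def sort_tom (stocks : List (List String)) : List (List String) :=
  -- first loop: append the 'Before Market Open' rows
  let sorted1 := stocks.foldl (fun acc stock =>
    if PySem.List.pyGet? stock 4 == some "Before Market Open" then acc ++ [stock] else acc) []
  -- second loop: append the 'Time Not Supplied' rows
  stocks.foldl (fun acc stock =>
    if PySem.List.pyGet? stock 4 == some "Time Not Supplied" then acc ++ [stock] else acc) sorted1

-- ===== PORT B =====
-- membership test s[4] in ('Before Market Open', 'Time Not Supplied')
def pvKeep (s : List String) : Bool :=
  PySem.List.pyGet? s 4 == some "Before Market Open"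
    || PySem.List.pyGet? s 4 == some "Time Not Supplied"

-- sort key: 0 if s[4] == 'Before Market Open' else 1
def pvKey (s : List String) : Int :=
  if PySem.List.pyGet? s 4 == some "Before Market Open" then 0 else 1

def sort_tom_alt (stocks : List (List String)) : List (List String) :=
  PySem.List.sorted (stocks.filter pvKeep) pvKey

-- ===== PRECONDITION & SPEC =====
-- Pre_ excludes exactly the inputs on which the Python A raises IndexError:
-- a stock row with fewer than 5 fields (stock[4] fails; B raises there too).
def Pre_sort_tom (stocks : List (List String)) : Prop :=
  ∀ s ∈ stocks, 5 ≤ s.length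
instance (stocks : List (List String)) : Decidable (Pre_sort_tom stocks) := by
  unfold Pre_sort_tom; infer_instance

def pvWitness_sort_tom : List (List String) :=
  [["T", "1", "2", "3", "Before Market Open"],
   ["U", "1", "2", "3", "Time Not Supplied"],
   ["V", "1", "2", "3", "After Market Close"]]

def Spec_sort_tom (stocks : List (List String)) (out : List (List String)) : Prop := out = sort_tom_alt stocks
instance (stocks : List (List String)) (out : List (List String)) : Decidable (Spec_sort_tom stocks out) := by unfold Spec_sort_tom; infer_instance

-- ===== CLAIM (what is proved, stated in full; the proofs are below) =====
def Claim_equal_sort_tom : Prop := ∀ (stocks : List (List String)), Dom_sort_tom stocks → Pre_sort_tom stocks → Spec_sort_tom stocks (sort_tom stocks)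

-- ===== LEMMAS AND PROOFS =====

theorem pvKey01 (x : List String) : pvKey x = 0 ∨ pvKey x = 1 := by
  unfold pvKey; split <;> simp

-- inserting into a "0-block ++ 1-block" list keeps the blocks, stably
theorem pv_insertBy_blocks (x : List String) (as bs : List (List String))
    (ha : ∀ a ∈ as, pvKey a = 0) (hb : ∀ b ∈ bs, pvKey b = 1) :
    PySem.List.insertBy (fun a b => decide (pvKey a < pvKey b)) x (as ++ bs) =
      if pvKey x = 0 then as ++ x :: bs else (as ++ bs) ++ [x] := by
  induction as with
  | nil =>
    simp only [List.nil_append]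
    induction bs with
    | nil => simp [PySem.List.insertBy]
    | cons b bs ih =>
      have hb1 : pvKey b = 1 := hb b (by simp)
      rcases pvKey01 x with hx | hx <;>
        simp_all [PySem.List.insertBy, ih fun c hc => hb c (by simp [hc])]
  | cons a as ih =>
    have ha0 : pvKey a = 0 := ha a (by simp)
    have h1 : (decide (pvKey x < pvKey a)) = false := by
      rcases pvKey01 x with hx | hx <;> simp [hx, ha0]
    have hih := ih (fun c hc => ha c (by simp [hc]))
    simp only [List.cons_append, PySem.List.insertBy, h1, Bool.false_eq_true, if_false]
    rw [hih]
    split <;> simp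

theorem pv_fold_blocks (xs : List (List String)) : ∀ (as bs : List (List String)),
    (∀ a ∈ as, pvKey a = 0) → (∀ b ∈ bs, pvKey b = 1) →
    xs.foldl (fun acc x => PySem.List.insertBy (fun a b => decide (pvKey a < pvKey b)) x acc) (as ++ bs)
      = (as ++ xs.filter (fun x => pvKey x == 0)) ++ (bs ++ xs.filter (fun x => !(pvKey x == 0))) := by
  induction xs with
  | nil => intro as bs _ _; simp
  | cons x xs ih =>
    intro as bs ha hb
    simp only [List.foldl_cons, pv_insertBy_blocks x as bs ha hb]
    rcases pvKey01 x with hx | hx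
    · rw [if_pos hx]
      have : as ++ x :: bs = (as ++ [x]) ++ bs := by simp
      rw [this, ih (as ++ [x]) bs
        (by intro a haa; rcases List.mem_append.mp haa with h | h
            · exact ha a h
            · simp at h; simpa [h] using hx) hb]
      simp [hx]
    · rw [if_neg (by omega)]
      have : (as ++ bs) ++ [x] = as ++ (bs ++ [x]) := by simp
      rw [this, ih as (bs ++ [x])
        ha
        (by intro b hbb; rcases List.mem_append.mp hbb with h | h
            · exact hb b h
            · simp at h; simpa [h] using hx)]
      have hxne : (pvKey x == 0) = false := by simp; omega
      simp [hxne]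

-- the stable 0/1-key sort is exactly "0-rows first, then 1-rows", in original order
theorem pv_sorted_split (ys : List (List String)) :
    PySem.List.sorted ys pvKey
      = ys.filter (fun x => pvKey x == 0) ++ ys.filter (fun x => !(pvKey x == 0)) := by
  rw [PySem.List.sorted_eq_foldl_insertBy]
  have := pv_fold_blocks ys [] [] (by simp) (by simp)
  simpa using this

theorem pv_filter_bmo (stocks : List (List String)) :
    (stocks.filter pvKeep).filter (fun x => pvKey x == 0)
      = stocks.filter (fun s => PySem.List.pyGet? s 4 == some "Before Market Open") := by
  rw [List.filter_filter]
  apply List.filter_congr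
  intro s _
  by_cases h : PySem.List.pyGet? s 4 = some "Before Market Open" <;> simp [pvKey, pvKeep, h]

theorem pv_filter_tns (stocks : List (List String)) :
    (stocks.filter pvKeep).filter (fun x => !(pvKey x == 0))
      = stocks.filter (fun s => PySem.List.pyGet? s 4 == some "Time Not Supplied") := by
  rw [List.filter_filter]
  apply List.filter_congr
  intro s _
  by_cases h : PySem.List.pyGet? s 4 = some "Before Market Open" <;>
    simp [pvKey, pvKeep, h]

-- ===== VERDICT (by name: the statement is the Claim_ definition above) =====
theorem sort_tom_spec : Claim_equal_sort_tom := by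
  intro stocks _ _
  unfold Spec_sort_tom sort_tom sort_tom_alt
  rw [PySem.List.foldl_append_if_eq_filter, PySem.List.foldl_append_if_eq_filter,
    pv_sorted_split, pv_filter_bmo, pv_filter_tns]
  simp
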